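-- pv_equiv track=rewrite | github.com/Lucas-Fiche/IDP_graduacao | terceiro_semestre/tecnicas/LEE04_py/ex006/arquivo.py | checar_arquivos
-- ===== SOURCE A (Python) =====
-- def checar_arquivos(num_testes, lista_casos):
--     resultados = []
--
--     for idx in range(num_testes):
--         num_linhas, dados_linhas = lista_casos[idx]
--         registros_unicos = set()
--         contador_erros = 0
--
--         for matricula_aluno, nome_disciplina in dados_linhas:
--             if (matricula_aluno, nome_disciplina) in registros_unicos:
--                 contador_erros += 1
--             else:
--                 registros_unicos.add((matricula_aluno, nome_disciplina))
--
--         if contador_erros == 0: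
--             resultados.append("Arquivo OK")
--         else:
--             resultados.append(f"Corrompido com {contador_erros} erro(s)")
--
--     return resultados
-- ===== SOURCE B (Python) =====
-- def checar_arquivos(num_testes, lista_casos):
--     def conta_repetidos(dados):
--         # a record is a duplicate error iff the same record occurs again later:
--         # each group of k equal records contributes k-1 errors either way.
--         erros = 0
--         resto = list(dados)
--         while resto:
--             cabeca, resto = resto[0], resto[1:]
--             if cabeca in resto:
--                 erros += 1
--         return erros
--
--     return [
--         "Arquivo OK" if erros == 0 else f"Corrompido com {erros} erro(s)"
--         for erros in (conta_repetidos(dados)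
--                       for _, dados in lista_casos[:max(num_testes, 0)])
--     ]
-- ===== Notes on version B (the rewrite author's own statement) =====
-- stated objective: alternative
-- what changed: B drops A's seen-set entirely: for each of the first num_testes cases it counts a record as an error iff the same record occurs again later in the file, via a head/suffix membership scan (duplicate-group of size k yields k-1 errors either way), then formats the same messages.
import Mathlib
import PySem

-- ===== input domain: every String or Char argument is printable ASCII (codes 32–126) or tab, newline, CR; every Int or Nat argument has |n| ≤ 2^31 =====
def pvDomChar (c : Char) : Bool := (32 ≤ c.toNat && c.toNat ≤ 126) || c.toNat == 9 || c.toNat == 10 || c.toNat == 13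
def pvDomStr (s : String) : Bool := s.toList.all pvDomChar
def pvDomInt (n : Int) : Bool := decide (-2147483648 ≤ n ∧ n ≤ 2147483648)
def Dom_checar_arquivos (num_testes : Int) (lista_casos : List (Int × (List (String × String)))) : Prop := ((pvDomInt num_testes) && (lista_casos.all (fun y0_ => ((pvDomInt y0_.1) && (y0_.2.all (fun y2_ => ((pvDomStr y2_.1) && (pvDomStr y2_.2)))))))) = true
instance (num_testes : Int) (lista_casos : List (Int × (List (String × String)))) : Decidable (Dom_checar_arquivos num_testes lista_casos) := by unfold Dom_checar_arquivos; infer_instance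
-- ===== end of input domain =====

-- B drops A's seen-set: a record is an error iff the same record occurs again later
-- (head/suffix membership scan); alternative set-free algorithm, not claimed faster.

-- ===== PORT A =====
def checar_arquivos (num_testes : Int) (lista_casos : List (Int × (List (String × String)))) : List String :=
  (PySem.List.pyRange 0 num_testes 1).foldl (fun resultados idx =>
    -- lista_casos[idx]; default only reachable outside Pre_ (Python raises IndexError there)
    let caso := PySem.List.pyGetD lista_casos idx (0, [])
    let st := caso.2.foldl
      (fun (p : PySem.Set (String × String) × Int) r =>
        if PySem.Set.contains p.1 r then (p.1, p.2 + 1) else (PySem.Set.add p.1 r, p.2))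
      (PySem.Set.empty, 0)
    if st.2 == 0 then resultados ++ ["Arquivo OK"]
    else resultados ++ ["Corrompido com " ++ PySem.Int.toStr st.2 ++ " erro(s)"]) []

-- ===== PORT B =====
-- B's while-loop peels the head off `resto` each turn: structural recursion on the list.
def pvContaRepetidos : List (String × String) → Int
  | [] => 0
  | cabeca :: resto => (if resto.contains cabeca then 1 else 0) + pvContaRepetidos resto

def checar_arquivos_alt (num_testes : Int) (lista_casos : List (Int × (List (String × String)))) : List String :=
  (PySem.List.slice lista_casos none (some (max num_testes 0))).map (fun caso =>
    let erros : Int := pvContaRepetidos caso.2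
    if erros == 0 then "Arquivo OK"
    else "Corrompido com " ++ PySem.Int.toStr erros ++ " erro(s)")

-- ===== PRECONDITION & SPEC =====
-- Pre_ excludes exactly num_testes > len(lista_casos), where A raises IndexError.
def Pre_checar_arquivos (num_testes : Int) (lista_casos : List (Int × (List (String × String)))) : Prop :=
  num_testes ≤ (lista_casos.length : Int)
instance (num_testes : Int) (lista_casos : List (Int × (List (String × String)))) : Decidable (Pre_checar_arquivos num_testes lista_casos) := by unfold Pre_checar_arquivos; infer_instance

def pvWitness_checar_arquivos : Int × (List (Int × (List (String × String)))) :=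
  (2, [(1, [("a", "x"), ("a", "x")]), (0, [])])

def Spec_checar_arquivos (num_testes : Int) (lista_casos : List (Int × (List (String × String)))) (out : List String) : Prop := out = checar_arquivos_alt num_testes lista_casos
instance (num_testes : Int) (lista_casos : List (Int × (List (String × String)))) (out : List String) : Decidable (Spec_checar_arquivos num_testes lista_casos out) := by unfold Spec_checar_arquivos; infer_instance

-- ===== CLAIM (what is proved, stated in full; the proofs are below) =====
def Claim_equal_checar_arquivos : Prop := ∀ (num_testes : Int) (lista_casos : List (Int × (List (String × String)))), Dom_checar_arquivos num_testes lista_casos → Pre_checar_arquivos num_testes lista_casos → Spec_checar_arquivos num_testes lista_casos (checar_arquivos num_testes lista_casos)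

-- ===== LEMMAS AND PROOFS =====

-- A's inner loop, generalized: final pair is (update s dados, running count by cardinality).
theorem pv_inner_loop (dados : List (String × String)) (s : PySem.Set (String × String)) (c : Int) :
    dados.foldl
      (fun (p : PySem.Set (String × String) × Int) r =>
        if PySem.Set.contains p.1 r then (p.1, p.2 + 1) else (PySem.Set.add p.1 r, p.2))
      (s, c)
    = (PySem.Set.update s dados,
       c + (dados.length : Int) + (s.length : Int) - ((PySem.Set.update s dados).length : Int)) := by
  induction dados generalizing s c with
  | nil => simp [PySem.Set.update]
  | cons r rs ih =>
    have hupd : PySem.Set.update s (r :: rs) = PySem.Set.update (PySem.Set.add s r) rs := rfl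
    by_cases h : r ∈ s
    · have hadd : PySem.Set.add s r = s := PySem.Set.add_of_mem h
      have hc : PySem.Set.contains s r = true := by simpa [PySem.Set.contains_iff]
      simp only [List.foldl, hc, if_pos]
      rw [ih, hupd, hadd]
      simp only [Prod.mk.injEq, List.length_cons]
      refine ⟨trivial, ?_⟩
      push_cast
      ring
    · have hadd : PySem.Set.add s r = s ++ [r] := PySem.Set.add_of_not_mem h
      have hc : PySem.Set.contains s r = false := by
        simp [h]
      simp only [List.foldl, hc, if_neg Bool.false_ne_true]
      rw [ih, hupd]
      simp only [Prod.mk.injEq, List.length_cons]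
      refine ⟨trivial, ?_⟩
      rw [hadd]
      simp only [List.length_append, List.length_singleton]
      push_cast
      ring

-- a duplicate-free list as a Finset
theorem pv_len_ofList (l : List (String × String)) :
    ((PySem.Set.ofList l).length : Int) = (l.toFinset.card : Int) := by
  have hnd : (PySem.Set.ofList l).Nodup := PySem.Set.nodup_ofList l
  have hfs : (PySem.Set.ofList l).toFinset = l.toFinset := by
    ext x
    simp [PySem.Set.mem_ofList]
  rw [← hfs, List.toFinset_card_of_nodup hnd]

-- B's head/suffix scan counts length minus number of distinct records
theorem pv_conta (l : List (String × String)) :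
    pvContaRepetidos l = (l.length : Int) - (l.toFinset.card : Int) := by
  induction l with
  | nil => simp [pvContaRepetidos]
  | cons x xs ih =>
    have hle : xs.toFinset.card ≤ xs.length := xs.toFinset_card_le
    by_cases h : x ∈ xs
    · have hc : xs.contains x = true := by simpa using h
      have hcard : (x :: xs).toFinset.card = xs.toFinset.card := by
        simp [List.toFinset_cons, Finset.insert_eq_self.mpr (List.mem_toFinset.mpr h)]
      simp only [pvContaRepetidos, hc, if_pos, ih, hcard, List.length_cons]
      push_cast
      ring
    · have hc : xs.contains x = false := by simpa using h
      have hcard : (x :: xs).toFinset.card = xs.toFinset.card + 1 := by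
        rw [List.toFinset_cons, Finset.card_insert_of_notMem (by simpa using h)]
      simp only [pvContaRepetidos, hc, if_neg Bool.false_ne_true, ih, hcard, List.length_cons]
      push_cast
      ring

-- the counter A's loop ends with equals B's head/suffix count
theorem pv_count (dados : List (String × String)) :
    (dados.foldl
      (fun (p : PySem.Set (String × String) × Int) r =>
        if PySem.Set.contains p.1 r then (p.1, p.2 + 1) else (PySem.Set.add p.1 r, p.2))
      (PySem.Set.empty, 0)).2
    = pvContaRepetidos dados := by
  rw [pv_inner_loop, pv_conta]
  have hof : PySem.Set.update PySem.Set.empty dados = PySem.Set.ofList dados := rfl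
  rw [hof]
  have := pv_len_ofList dados
  simp [PySem.Set.empty]
  omega

-- A's accumulating loop body as a map
theorem pv_foldl_append {α : Type} (p : α → Bool) (g1 g2 : α → String)
    (l : List α) (acc : List String) :
    l.foldl (fun res x => if p x then res ++ [g1 x] else res ++ [g2 x]) acc
      = acc ++ l.map (fun x => if p x then g1 x else g2 x) := by
  induction l generalizing acc with
  | nil => simp
  | cons x xs ih =>
    by_cases h : p x = true <;> simp [List.foldl, h, ih]

-- reading the first n elements through getD is take n
theorem pv_range_getD {α β : Type} (F : α → β) (d : α) (lc : List α) (n : Nat)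
    (hn : n ≤ lc.length) :
    (List.range n).map (fun k => F (lc.getD k d)) = (lc.take n).map F := by
  apply List.ext_getElem
  · simp [Nat.min_eq_left hn]
  · intro i h1 h2
    have hi : i < n := by simpa using h1
    have hilen : i < lc.length := lt_of_lt_of_le hi hn
    simp [List.getD_eq_getElem?_getD, List.getElem?_eq_getElem hilen]

theorem pv_main (n : Nat) (lista_casos : List (Int × (List (String × String))))
    (hn : n ≤ lista_casos.length) :
    checar_arquivos (n : Int) lista_casos = checar_arquivos_alt (n : Int) lista_casos := by
  simp only [checar_arquivos, checar_arquivos_alt]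
  have hmax : max ((n : Nat) : Int) 0 = ((n : Nat) : Int) := max_eq_left (by positivity)
  rw [hmax, PySem.List.slice_to_natCast, PySem.List.pyRange_zero_natCast, List.foldl_map,
    pv_foldl_append, List.nil_append]
  simp only [PySem.List.pyGetD_natCast]
  rw [pv_range_getD
      (fun caso => if ((caso.2.foldl
          (fun (p : PySem.Set (String × String) × Int) r =>
            if PySem.Set.contains p.1 r then (p.1, p.2 + 1) else (PySem.Set.add p.1 r, p.2))
          (PySem.Set.empty, 0)).2 == 0) then "Arquivo OK"
        else "Corrompido com " ++ PySem.Int.toStr ((caso.2.foldl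
          (fun (p : PySem.Set (String × String) × Int) r =>
            if PySem.Set.contains p.1 r then (p.1, p.2 + 1) else (PySem.Set.add p.1 r, p.2))
          (PySem.Set.empty, 0)).2) ++ " erro(s)")
      ((0 : Int), ([] : List (String × String))) lista_casos n hn]
  refine List.map_congr_left ?_
  intro caso _
  rw [pv_count]

-- ===== VERDICT (by name: the statement is the Claim_ definition above) =====
theorem checar_arquivos_spec : Claim_equal_checar_arquivos := by
  intro num_testes lista_casos _ hle
  unfold Pre_checar_arquivos at hle
  unfold Spec_checar_arquivos
  by_cases h0 : 0 ≤ num_testes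
  · obtain ⟨n, rfl⟩ : ∃ n : Nat, num_testes = (n : Int) := ⟨num_testes.toNat, (Int.toNat_of_nonneg h0).symm⟩
    exact pv_main n lista_casos (by exact_mod_cast hle)
  · have hneg : num_testes ≤ 0 := le_of_not_ge h0
    simp only [checar_arquivos, checar_arquivos_alt]
    rw [PySem.List.pyRange_one_eq_nil hneg, max_eq_right hneg, PySem.List.slice_to lista_casos (le_refl (0 : Int))]
    simp
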